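-- pv_equiv track=rewrite | github.com/pypi-data/pypi-mirror-345 | packages/therm-inv-tools/therm_inv_tools-0.2.3-py3-none-any.whl/tools/thermal_interacting_tools.py | occ_string
-- ===== SOURCE A (Python) =====
-- def occ_string(N):
--     """
--     Function to write an up/down spin string
--     """
--     occ_string = ''
--     for i in range(N):
--         i+=1
--         if i%2==0:
--             occ_string += 'd'
--         else:
--             occ_string += 'u'
--     return occ_string
-- ===== SOURCE B (Python) =====
-- def occ_string(N):
--     """
--     Function to write an up/down spin string
--     """
--     return ('ud' * ((N + 1) // 2))[:N]
-- ===== Notes on version B (the rewrite author's own statement) =====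
-- stated objective: idiomatic
-- what changed: Replaces the per-position loop with its parity branch and repeated string concatenation by one repetition of the two-character unit 'ud' followed by a single slice to length N.
import Mathlib
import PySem

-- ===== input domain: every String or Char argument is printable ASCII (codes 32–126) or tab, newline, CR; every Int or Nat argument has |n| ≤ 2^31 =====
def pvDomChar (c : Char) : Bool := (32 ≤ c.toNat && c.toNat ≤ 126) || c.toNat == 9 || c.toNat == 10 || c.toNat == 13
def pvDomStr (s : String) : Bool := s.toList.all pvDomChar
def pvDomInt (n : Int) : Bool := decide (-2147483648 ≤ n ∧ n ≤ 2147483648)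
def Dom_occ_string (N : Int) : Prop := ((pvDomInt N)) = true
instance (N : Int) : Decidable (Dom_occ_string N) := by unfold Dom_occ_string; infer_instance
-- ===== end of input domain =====

-- B builds the string by repeating the unit "ud" and slicing to length N instead of
-- looping position by position with a parity test (objective: idiomatic).

-- ===== PORT A =====
-- loop over range(N), i += 1, append 'd' on even i else 'u'
def occ_string (N : Int) : String :=
  String.ofList ((PySem.List.pyRange 0 N 1).foldl
    (fun acc i =>
      let i := i + 1
      acc ++ (if PySem.Int.mod i 2 = 0 then ['d'] else ['u'])) [])

-- ===== PORT B =====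
-- ('ud' * ((N + 1) // 2))[:N]
def occ_string_alt (N : Int) : String :=
  String.ofList (PySem.List.slice
    (PySem.List.pyRepeat ['u', 'd'] (PySem.Int.floordiv (N + 1) 2)) none (some N))

-- ===== PRECONDITION & SPEC =====
def Spec_occ_string (N : Int) (out : String) : Prop := out = occ_string_alt N
instance (N : Int) (out : String) : Decidable (Spec_occ_string N out) := by unfold Spec_occ_string; infer_instance

-- ===== CLAIM (what is proved, stated in full; the proofs are below) =====
def Claim_equal_occ_string : Prop := ∀ (N : Int), Dom_occ_string N → Spec_occ_string N (occ_string N)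

-- ===== LEMMAS AND PROOFS =====

-- the alternating string of length n, built back-to-front (A's loop in Nat form)
def pvAlt : Nat → List Char
  | 0 => []
  | n + 1 => pvAlt n ++ [if (n + 1) % 2 = 0 then 'd' else 'u']

theorem pvAlt_length : ∀ (n : Nat), (pvAlt n).length = n := by
  intro n
  induction n with
  | zero => rfl
  | succ n ih => simp [pvAlt, ih]

theorem pvAlt_prefix : ∀ (n m : Nat), n ≤ m → ∃ t, pvAlt m = pvAlt n ++ t := by
  intro n m h
  induction m with
  | zero =>
    have hz : n = 0 := Nat.le_zero.mp h
    exact ⟨[], by simp [hz]⟩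
  | succ m ih =>
    rcases Nat.lt_or_ge n (m + 1) with h' | h'
    · obtain ⟨t, ht⟩ := ih (Nat.lt_succ_iff.mp h')
      exact ⟨t ++ [if (m + 1) % 2 = 0 then 'd' else 'u'], by simp [pvAlt, ht]⟩
    · have : n = m + 1 := Nat.le_antisymm h h'
      exact ⟨[], by simp [this]⟩

theorem pvAlt_take : ∀ (n m : Nat), n ≤ m → (pvAlt m).take n = pvAlt n := by
  intro n m h
  obtain ⟨t, ht⟩ := pvAlt_prefix n m h
  rw [ht, List.take_append_of_le_length (by rw [pvAlt_length])]
  simp [List.take_of_length_le (le_of_eq (pvAlt_length n))]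

theorem pvRepeat_eq_pvAlt : ∀ (k : Nat),
    (List.replicate k ['u', 'd']).flatten = pvAlt (2 * k) := by
  intro k
  induction k with
  | zero => rfl
  | succ k ih =>
    rw [List.replicate_succ', List.flatten_append, ih]
    have h2 : 2 * (k + 1) = (2 * k + 1) + 1 := by omega
    rw [h2]
    show pvAlt (2 * k) ++ ['u', 'd'] = pvAlt (2 * k + 1) ++ _
    simp [pvAlt, Nat.add_mod, Nat.mul_mod_right]

theorem pvA_eq_pvAlt : ∀ (n : Nat),
    ((PySem.List.pyRange 0 (n : Int) 1).foldl
      (fun acc i =>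
        let i := i + 1
        acc ++ (if PySem.Int.mod i 2 = 0 then ['d'] else ['u'])) []) = pvAlt n := by
  intro n
  induction n with
  | zero => simp [PySem.List.pyRange_one_eq_nil, pvAlt]
  | succ n ih =>
    have hcast : ((n : Int) + 1) = ((n + 1 : Nat) : Int) := by push_cast; ring
    rw [← hcast, PySem.List.pyRange_one_succ_right (by positivity), List.foldl_append, ih]
    simp only [List.foldl]
    have hm : PySem.Int.mod ((n : Int) + 1) 2 = (((n + 1) % 2 : Nat) : Int) := by
      rw [hcast]; exact_mod_cast PySem.Int.mod_natCast (n + 1) 2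
    rw [hm, pvAlt]
    by_cases h : (n + 1) % 2 = 0 <;> simp [h] <;> omega

theorem occ_string_spec : Claim_equal_occ_string := by
  unfold Claim_equal_occ_string Spec_occ_string occ_string occ_string_alt
  intro N _
  rcases (show N ≤ 0 ∨ 0 < N by omega) with hN | hN
  · -- both sides empty
    have hr : PySem.List.pyRange 0 N 1 = [] := PySem.List.pyRange_one_eq_nil hN
    simp [hr, PySem.List.pyRepeat, PySem.List.slice]
    exact Or.inr (by omega)
  · -- N > 0
    obtain ⟨n, hn⟩ : ∃ n : Nat, N = (n : Int) := ⟨N.toNat, by omega⟩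
    subst hn
    have hk : PySem.Int.floordiv ((n : Int) + 1) 2 = (((n + 1) / 2 : Nat) : Int) := by
      have : ((n : Int) + 1) = ((n + 1 : Nat) : Int) := by push_cast; ring
      rw [this]; exact_mod_cast PySem.Int.floordiv_natCast (n + 1) 2
    rw [pvA_eq_pvAlt, hk]
    refine congrArg String.ofList ?_
    rw [PySem.List.slice_to _ (Int.natCast_nonneg n), PySem.List.pyRepeat]
    simp only [Int.toNat_natCast, pvRepeat_eq_pvAlt]
    rw [pvAlt_take n (2 * ((n + 1) / 2)) (by omega)]
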